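-- pv_equiv track=rewrite | github.com/Cornul11/JarSift | util/parse_top_maven_libs.py | find_most_popular_and_vulnerable
-- ===== SOURCE A (Python) =====
-- def find_most_popular_and_vulnerable(version_data):
--     non_vulnerable_versions = [v for v in version_data if v[2] == 0]
--     vulnerable_versions = [v for v in version_data if v[2] > 0]
--
--     most_popular_non_vulnerable = max(
--         non_vulnerable_versions, key=lambda x: x[1], default=None
--     )
--     most_popular_vulnerable = max(vulnerable_versions, key=lambda x: x[1], default=None)
--
--     return most_popular_non_vulnerable, most_popular_vulnerable
-- ===== SOURCE B (Python) =====
-- def find_most_popular_and_vulnerable(version_data):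
--     best_nonvuln = None
--     best_vuln = None
--     for v in version_data:
--         if v[2] == 0:
--             if best_nonvuln is None or v[1] > best_nonvuln[1]:
--                 best_nonvuln = v
--         elif v[2] > 0:
--             if best_vuln is None or v[1] > best_vuln[1]:
--                 best_vuln = v
--     return best_nonvuln, best_vuln
-- ===== Notes on version B (the rewrite author's own statement) =====
-- stated objective: simpler
-- what changed: Replaces the two filtering list comprehensions plus two max(..., key=..., default=None) calls with one pass over version_data maintaining two running-best variables, updating only on strictly greater count to keep max's first-wins tie-breaking.
import Mathlib
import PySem

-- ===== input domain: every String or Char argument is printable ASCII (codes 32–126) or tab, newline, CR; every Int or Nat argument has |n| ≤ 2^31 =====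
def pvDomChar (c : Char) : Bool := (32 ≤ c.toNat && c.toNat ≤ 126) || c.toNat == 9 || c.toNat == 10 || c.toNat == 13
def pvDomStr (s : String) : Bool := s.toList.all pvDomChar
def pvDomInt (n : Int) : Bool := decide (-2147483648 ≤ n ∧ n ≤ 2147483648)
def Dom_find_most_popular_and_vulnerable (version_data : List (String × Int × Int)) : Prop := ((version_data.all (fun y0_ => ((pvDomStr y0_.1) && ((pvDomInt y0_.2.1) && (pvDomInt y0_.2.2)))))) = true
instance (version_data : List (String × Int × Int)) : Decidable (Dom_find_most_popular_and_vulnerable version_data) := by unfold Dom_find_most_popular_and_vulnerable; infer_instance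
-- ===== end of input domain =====

-- B replaces A's two filter comprehensions and two max calls by one pass maintaining
-- two running-best accumulators (strict-greater updates preserve max's first-wins ties): simpler, no intermediate lists.


-- ===== PORT A =====
def find_most_popular_and_vulnerable (version_data : List (String × Int × Int)) : (Option (String × Int × Int)) × (Option (String × Int × Int)) :=
  let non_vulnerable_versions := version_data.filter (fun v => v.2.2 == 0)
  let vulnerable_versions := version_data.filter (fun v => v.2.2 > 0)
  let most_popular_non_vulnerable := PySem.List.max? non_vulnerable_versions (fun x => x.2.1)
  let most_popular_vulnerable := PySem.List.max? vulnerable_versions (fun x => x.2.1)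
  (most_popular_non_vulnerable, most_popular_vulnerable)

-- ===== PORT B =====
-- update a running best on strictly greater count (first-wins ties)
def pvUpd (best : Option (String × Int × Int)) (v : String × Int × Int) : Option (String × Int × Int) :=
  match best with
  | none => some v
  | some b => if v.2.1 > b.2.1 then some v else some b

def find_most_popular_and_vulnerable_alt (version_data : List (String × Int × Int)) : (Option (String × Int × Int)) × (Option (String × Int × Int)) :=
  version_data.foldl
    (fun acc v =>
      if v.2.2 == 0 then (pvUpd acc.1 v, acc.2)
      else if v.2.2 > 0 then (acc.1, pvUpd acc.2 v)
      else acc)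
    (none, none)

-- ===== PRECONDITION & SPEC =====
def Spec_find_most_popular_and_vulnerable (version_data : List (String × Int × Int)) (out : (Option (String × Int × Int)) × (Option (String × Int × Int))) : Prop := out = find_most_popular_and_vulnerable_alt version_data
instance (version_data : List (String × Int × Int)) (out : (Option (String × Int × Int)) × (Option (String × Int × Int))) : Decidable (Spec_find_most_popular_and_vulnerable version_data out) := by unfold Spec_find_most_popular_and_vulnerable; infer_instance

-- ===== CLAIM (what is proved, stated in full; the proofs are below) =====
def Claim_equal_find_most_popular_and_vulnerable : Prop := ∀ (version_data : List (String × Int × Int)), Dom_find_most_popular_and_vulnerable version_data → Spec_find_most_popular_and_vulnerable version_data (find_most_popular_and_vulnerable version_data)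

-- ===== LEMMAS AND PROOFS =====

def pvMaxStep (acc : Option (String × Int × Int)) (x : String × Int × Int) : Option (String × Int × Int) :=
  match acc with
  | none => some x
  | some m => if m.2.1 < x.2.1 then some x else some m

-- B's pair fold splits into two independent per-accumulator folds.
theorem alt_fold_split (l : List (String × Int × Int)) (a b : Option (String × Int × Int)) :
    l.foldl
      (fun acc v =>
        if v.2.2 == 0 then (pvUpd acc.1 v, acc.2)
        else if v.2.2 > 0 then (acc.1, pvUpd acc.2 v)
        else acc)
      (a, b)
    = (l.foldl (fun acc v => if v.2.2 == 0 then pvUpd acc v else acc) a,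
       l.foldl (fun acc v => if v.2.2 > 0 then pvUpd acc v else acc) b) := by
  induction l generalizing a b with
  | nil => rfl
  | cons x t ih =>
      simp only [List.foldl_cons]
      by_cases h0 : (x.2.2 == 0) = true
      · have hnp : ¬ x.2.2 > 0 := by simp_all
        rw [if_pos h0, if_pos h0, if_neg hnp]
        exact ih _ _
      · by_cases h1 : x.2.2 > 0
        · rw [if_neg h0, if_pos h1, if_neg h0, if_pos h1]
          exact ih _ _
        · rw [if_neg h0, if_neg h1, if_neg h0, if_neg h1]
          exact ih _ _

-- the strict-update accumulator step is exactly max?'s step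
theorem pvUpd_eq_maxStep (a : Option (String × Int × Int)) (x : String × Int × Int) :
    pvUpd a x = pvMaxStep a x := rfl

-- the nonvuln guarded fold is the max?-fold over A's first filter
theorem fold_nonvuln (l : List (String × Int × Int)) (a : Option (String × Int × Int)) :
    l.foldl (fun acc v => if v.2.2 == 0 then pvUpd acc v else acc) a
      = (l.filter (fun v => v.2.2 == 0)).foldl pvMaxStep a := by
  induction l generalizing a with
  | nil => rfl
  | cons x t ih =>
      simp only [List.foldl_cons, List.filter_cons]
      by_cases h0 : (x.2.2 == 0) = true
      · rw [if_pos h0, if_pos h0, List.foldl_cons, pvUpd_eq_maxStep]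
        exact ih _
      · rw [if_neg h0, if_neg h0]
        exact ih _

-- the vuln guarded fold is the max?-fold over A's second filter
theorem fold_vuln (l : List (String × Int × Int)) (a : Option (String × Int × Int)) :
    l.foldl (fun acc v => if v.2.2 > 0 then pvUpd acc v else acc) a
      = (l.filter (fun v => v.2.2 > 0)).foldl pvMaxStep a := by
  induction l generalizing a with
  | nil => rfl
  | cons x t ih =>
      simp only [List.foldl_cons, List.filter_cons]
      by_cases h1 : x.2.2 > 0
      · rw [if_pos h1, if_pos (by simpa using h1 : (decide (x.2.2 > 0)) = true), List.foldl_cons, pvUpd_eq_maxStep]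
        exact ih _
      · rw [if_neg h1, if_neg (by simpa using h1 : ¬ (decide (x.2.2 > 0)) = true)]
        exact ih _

theorem max?_eq_foldl_pvMaxStep (l : List (String × Int × Int)) :
    PySem.List.max? l (fun x => x.2.1) = l.foldl pvMaxStep none := by
  simp only [PySem.List.max?]
  congr 1
  funext acc x
  cases acc <;> rfl

theorem main_eq (l : List (String × Int × Int)) :
    find_most_popular_and_vulnerable l = find_most_popular_and_vulnerable_alt l := by
  unfold find_most_popular_and_vulnerable find_most_popular_and_vulnerable_alt
  dsimp only
  rw [alt_fold_split, fold_nonvuln, fold_vuln, max?_eq_foldl_pvMaxStep, max?_eq_foldl_pvMaxStep]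

-- ===== VERDICT (by name: the statement is the Claim_ definition above) =====
theorem find_most_popular_and_vulnerable_spec : Claim_equal_find_most_popular_and_vulnerable := by
  intro l _
  unfold Spec_find_most_popular_and_vulnerable
  exact main_eq l
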